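-- pv_equiv track=rewrite | github.com/meekotan/doc-extractor | extractor/currency.py | resolve_currency
-- ===== SOURCE A (Python) =====
-- def resolve_currency(raw: str | None, db: list[dict]) -> tuple[str | None, str | None]:
--     """
--     Return (currency_code, currency_name) by looking up *raw* in the DB.
--     Matches first by code, then by name substring — same logic as original workflow.
--     """
--     if not raw or not db:
--         return None, None
--
--     key = str(raw).strip().upper()
--
--     for row in db:
--         if str(row.get("code", "")).upper() == key:
--             return row["code"], row.get("name")
--
--     for row in db:
--         if key in str(row.get("name", "")).upper():
--             return row["code"], row.get("name")
--
--     return raw, None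
-- ===== SOURCE B (Python) =====
-- def resolve_currency(raw, db):
--     if not raw or not db:
--         return None, None
--
--     key = str(raw).strip().upper()
--
--     hit = None
--     for row in db:
--         if str(row.get("code", "")).upper() == key:
--             return row["code"], row.get("name")
--         if hit is None and key in str(row.get("name", "")).upper():
--             hit = row
--
--     if hit is not None:
--         return hit["code"], hit.get("name")
--     return raw, None
-- ===== Notes on version B (the rewrite author's own statement) =====
-- stated objective: simpler
-- what changed: Replaces A's two sequential scans of db (code pass, then name pass) by a single pass that returns immediately on a code match and remembers the first name-matching row for use after the loop.
import Mathlib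
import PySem

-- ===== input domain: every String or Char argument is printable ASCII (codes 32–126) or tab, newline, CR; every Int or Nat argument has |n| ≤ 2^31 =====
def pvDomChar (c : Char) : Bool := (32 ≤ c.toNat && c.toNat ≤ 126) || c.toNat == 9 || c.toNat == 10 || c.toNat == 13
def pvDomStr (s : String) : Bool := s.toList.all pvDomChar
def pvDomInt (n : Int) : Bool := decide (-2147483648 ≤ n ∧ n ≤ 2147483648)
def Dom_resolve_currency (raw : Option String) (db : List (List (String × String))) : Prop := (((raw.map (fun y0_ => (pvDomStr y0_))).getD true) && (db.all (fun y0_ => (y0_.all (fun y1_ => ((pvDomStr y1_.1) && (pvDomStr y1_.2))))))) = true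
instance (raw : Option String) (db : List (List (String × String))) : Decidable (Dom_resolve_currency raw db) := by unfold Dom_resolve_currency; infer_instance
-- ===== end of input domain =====

-- B replaces A's two sequential scans of db by one pass that returns on a code match
-- and remembers the first name-matching row for after the loop (objective: simpler).

-- ===== PORT A =====
-- row.get(k) on a dict row represented as an association list: first match.
def pvLookup (row : List (String × String)) (k : String) : Option String :=
  match row with
  | [] => none
  | (k', v) :: rest => if k' = k then some v else pvLookup rest k

-- first loop of A: 'for row in db: if str(row.get("code","")).upper() == key: return …'
def pvACodeLoop (key : String) (db : List (List (String × String))) :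
    Option (Option String × Option String) :=
  match db with
  | [] => none
  | row :: rest =>
    if PySem.Str.upper ((pvLookup row "code").getD "") = key then
      some (pvLookup row "code", pvLookup row "name")
    else pvACodeLoop key rest

-- second loop of A: 'for row in db: if key in str(row.get("name","")).upper(): return …'
def pvANameLoop (key : String) (db : List (List (String × String))) :
    Option (Option String × Option String) :=
  match db with
  | [] => none
  | row :: rest =>
    if PySem.Str.isIn key (PySem.Str.upper ((pvLookup row "name").getD "")) then
      some (pvLookup row "code", pvLookup row "name")
    else pvANameLoop key rest

def resolve_currency (raw : Option String) (db : List (List (String × String))) :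
    Option String × Option String :=
  match raw with
  | none => (none, none)
  | some s =>
    if s = "" ∨ db = [] then (none, none)
    else
      let key := PySem.Str.upper (PySem.Str.strip s)
      match pvACodeLoop key db with
      | some out => out
      | none =>
        match pvANameLoop key db with
        | some out => out
        | none => (some s, none)

-- ===== PORT B =====
-- single pass: return on code match, remember the first name-matching row in 'hit'
def pvBGo (key s : String) (db : List (List (String × String)))
    (hit : Option (List (String × String))) : Option String × Option String :=
  match db with
  | [] =>
    match hit with
    | some row => (pvLookup row "code", pvLookup row "name")
    | none => (some s, none)
  | row :: rest =>
    if PySem.Str.upper ((pvLookup row "code").getD "") = key then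
      (pvLookup row "code", pvLookup row "name")
    else
      pvBGo key s rest
        (if hit.isNone && PySem.Str.isIn key (PySem.Str.upper ((pvLookup row "name").getD "")) then
          some row
        else hit)

def resolve_currency_alt (raw : Option String) (db : List (List (String × String))) :
    Option String × Option String :=
  match raw with
  | none => (none, none)
  | some s =>
    if s = "" ∨ db = [] then (none, none)
    else pvBGo (PySem.Str.upper (PySem.Str.strip s)) s db none

-- ===== PRECONDITION & SPEC =====
-- the row A's lookup selects (first code match, else first name match)
def pvSelRow (key : String) (db : List (List (String × String))) :
    Option (List (String × String)) :=
  (db.find? (fun row =>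
      PySem.Str.upper ((((row.find? (fun p => p.1 = "code")).map Prod.snd).getD "")) = key)).or
  (db.find? (fun row =>
      PySem.Str.isIn key (PySem.Str.upper (((row.find? (fun p => p.1 = "name")).map Prod.snd).getD ""))))

-- Pre_ excludes exactly the inputs on which A raises KeyError (row["code"] on a
-- matching row that has no "code" key); on those inputs A returns no value.
def Pre_resolve_currency (raw : Option String) (db : List (List (String × String))) : Prop :=
  (raw.all (fun s =>
    s == "" || db.isEmpty ||
      (pvSelRow (PySem.Str.upper (PySem.Str.strip s)) db).all
        (fun row => (row.find? (fun p => p.1 = "code")).isSome))) = true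

instance (raw : Option String) (db : List (List (String × String))) :
    Decidable (Pre_resolve_currency raw db) := by unfold Pre_resolve_currency; infer_instance

def pvWitness_resolve_currency : Option String × (List (List (String × String))) :=
  (some "usd", [[("code", "USD"), ("name", "US Dollar")], [("code", "EUR"), ("name", "Euro")]])

def Spec_resolve_currency (raw : Option String) (db : List (List (String × String))) (out : Option String × Option String) : Prop := out = resolve_currency_alt raw db
instance (raw : Option String) (db : List (List (String × String))) (out : Option String × Option String) : Decidable (Spec_resolve_currency raw db out) := by unfold Spec_resolve_currency; infer_instance

-- ===== CLAIM (what is proved, stated in full; the proofs are below) =====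
def Claim_equal_resolve_currency : Prop := ∀ (raw : Option String) (db : List (List (String × String))), Dom_resolve_currency raw db → Pre_resolve_currency raw db → Spec_resolve_currency raw db (resolve_currency raw db)

-- ===== LEMMAS AND PROOFS =====

-- B's single pass, at accumulator 'hit', computes A's two-loop result with 'hit'
-- standing for the name match recorded so far.
theorem pvBGo_spec (key s : String) (db : List (List (String × String)))
    (hit : Option (List (String × String))) :
    pvBGo key s db hit =
      match pvACodeLoop key db with
      | some out => out
      | none =>
        match hit with
        | some row => (pvLookup row "code", pvLookup row "name")
        | none =>
          match pvANameLoop key db with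
          | some out => out
          | none => (some s, none) := by
  induction db generalizing hit with
  | nil => simp [pvBGo, pvACodeLoop, pvANameLoop]
  | cons row rest ih =>
    simp only [pvBGo, pvACodeLoop, pvANameLoop]
    by_cases hc : PySem.Str.upper ((pvLookup row "code").getD "") = key
    · simp [hc]
    · simp only [hc, if_false]
      rw [ih]
      rcases hit with _ | h
      · by_cases hn : PySem.Str.isIn key (PySem.Str.upper ((pvLookup row "name").getD "")) = true
        · simp at hn
          simp [hn]
        · simp at hn
          simp [hn]
      · simp

-- ===== VERDICT (by name: the statement is the Claim_ definition above) =====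
theorem resolve_currency_spec : Claim_equal_resolve_currency := by
  intro raw db _ _
  unfold Spec_resolve_currency resolve_currency resolve_currency_alt
  rcases raw with _ | s
  · rfl
  · by_cases h : s = "" ∨ db = []
    · simp [h]
    · simp only [h, if_false]
      rw [pvBGo_spec]
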